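-- pv_equiv track=rewrite | github.com/daniel-reich/ubiquitous-fiesta | YRwZvg5Pkgw4pEWC5_11.py | flick_switch
-- ===== SOURCE A (Python) =====
-- def flick_switch(lst):
--   a=True
--   c=[]
--   for i in range(len(lst)):
--     if lst[i]!="flick":
--       c.append(a)
--     if lst[i]=="flick":
--       a=not a
--       c.append(a)
--
--   return c
-- ===== SOURCE B (Python) =====
-- def flick_switch(lst):
--     # Segment-based: jump from one "flick" to the next with list.index,
--     # emitting a whole constant run per segment instead of toggling per element.
--     out = []
--     state = True
--     pos = 0
--     while True:
--         try:
--             i = lst.index("flick", pos)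
--         except ValueError:
--             out += [state] * (len(lst) - pos)
--             return out
--         out += [state] * (i - pos)
--         state = not state
--         out.append(state)
--         pos = i + 1
-- ===== Notes on version B (the rewrite author's own statement) =====
-- stated objective: simpler
-- what changed: Replaces A's per-element boolean-toggle loop (two conditional appends per element) by segment jumps: list.index('flick', pos) locates each flick and a whole constant run [state]*(i-pos) is emitted per segment.
import Mathlib
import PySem

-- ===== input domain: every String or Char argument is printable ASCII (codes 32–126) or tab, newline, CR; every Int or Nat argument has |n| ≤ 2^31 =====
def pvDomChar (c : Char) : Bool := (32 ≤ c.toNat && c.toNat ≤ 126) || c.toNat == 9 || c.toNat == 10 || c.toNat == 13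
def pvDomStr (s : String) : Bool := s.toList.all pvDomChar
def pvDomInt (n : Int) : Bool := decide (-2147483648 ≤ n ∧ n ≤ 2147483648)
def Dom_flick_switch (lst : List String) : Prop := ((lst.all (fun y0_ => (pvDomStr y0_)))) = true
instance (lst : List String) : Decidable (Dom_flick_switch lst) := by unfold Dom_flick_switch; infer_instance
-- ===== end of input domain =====

-- B replaces A's per-element boolean-toggle loop by segment jumps: it finds each
-- "flick" with list.index(…, pos) and emits a whole constant run per segment
-- (simpler decomposition, same O(n) cost).


-- ===== PORT A =====
-- for-loop over the elements in order, state (a, c); the two independent ifs of A kept in order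
def flick_switch (lst : List String) : List Bool :=
  (lst.foldl (fun (st : Bool × List Bool) x =>
      let st := if x ≠ "flick" then (st.1, st.2 ++ [st.1]) else st
      if x = "flick" then (!st.1, st.2 ++ [!st.1]) else st)
    (true, [])).2

-- ===== PORT B =====
-- the while loop of Source B as tail recursion on pos; lst.index("flick", pos) is
-- pos + (lst.drop pos).idxOf "flick" when "flick" ∈ lst.drop pos, ValueError otherwise
def flickGo (lst : List String) (state : Bool) (pos : Nat) (out : List Bool) : List Bool :=
  let rest := lst.drop pos
  if h : "flick" ∈ rest then
    let i := pos + rest.idxOf "flick"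
    flickGo lst (!state) (i + 1) (out ++ List.replicate (i - pos) state ++ [!state])
  else out ++ List.replicate rest.length state
termination_by lst.length - pos
decreasing_by
  have h1 : rest.idxOf "flick" < rest.length := List.idxOf_lt_length_of_mem h
  have h2 : rest.length = lst.length - pos := by simp [rest]
  omega

def flick_switch_alt (lst : List String) : List Bool :=
  flickGo lst true 0 []

-- ===== PRECONDITION & SPEC =====
def Spec_flick_switch (lst : List String) (out : List Bool) : Prop := out = flick_switch_alt lst
instance (lst : List String) (out : List Bool) : Decidable (Spec_flick_switch lst out) := by unfold Spec_flick_switch; infer_instance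

-- ===== CLAIM (what is proved, stated in full; the proofs are below) =====
def Claim_equal_flick_switch : Prop := ∀ (lst : List String), Dom_flick_switch lst → Spec_flick_switch lst (flick_switch lst)

-- ===== LEMMAS AND PROOFS =====
-- reference cons-recursion: the per-element characterisation both ports are reduced to
def seg : List String → Bool → List Bool
  | [], _ => []
  | x :: xs, a => if x = "flick" then (!a) :: seg xs (!a) else a :: seg xs a

theorem seg_not_mem (rest : List String) (a : Bool) (h : "flick" ∉ rest) :
    seg rest a = List.replicate rest.length a := by
  induction rest with
  | nil => rfl
  | cons x xs ih =>
    simp only [List.mem_cons, not_or] at h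
    simp [seg, Ne.symm h.1, ih h.2, List.replicate_succ]

theorem seg_mem (rest : List String) (a : Bool) (h : "flick" ∈ rest) :
    seg rest a = List.replicate (rest.idxOf "flick") a ++
      (!a) :: seg (rest.drop (rest.idxOf "flick" + 1)) (!a) := by
  induction rest generalizing a with
  | nil => cases h
  | cons x xs ih =>
    by_cases hx : x = "flick"
    · subst hx; simp [seg, List.idxOf_cons_self]
    · have hm : "flick" ∈ xs := by
        rcases List.mem_cons.mp h with h' | h'
        · exact absurd h'.symm hx
        · exact h'
      have hidx : (x :: xs).idxOf "flick" = xs.idxOf "flick" + 1 := by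
        simp [hx]
      rw [hidx]
      simp [seg, hx, ih _ hm, List.replicate_succ]

theorem flickGo_eq (n : Nat) : ∀ (lst : List String) (a : Bool) (pos : Nat) (out : List Bool),
    lst.length - pos ≤ n →
    flickGo lst a pos out = out ++ seg (lst.drop pos) a := by
  induction n with
  | zero =>
    intro lst a pos out hn
    have hd : lst.drop pos = [] := by
      apply List.drop_eq_nil_of_le; omega
    rw [flickGo]
    simp [hd, seg]
  | succ n ih =>
    intro lst a pos out hn
    rw [flickGo]
    by_cases h : "flick" ∈ lst.drop pos
    · simp only [h, dif_pos]
      set rest := lst.drop pos with hrest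
      set j := rest.idxOf "flick" with hj
      have hjlt : j < rest.length := List.idxOf_lt_length_of_mem h
      have hlen : rest.length = lst.length - pos := by simp [hrest]
      have hdrop : lst.drop (pos + j + 1) = rest.drop (j + 1) := by
        rw [hrest, List.drop_drop]; ring_nf
      have hrec := ih lst (!a) (pos + j + 1)
        (out ++ List.replicate (pos + j - pos) a ++ [!a]) (by omega)
      rw [hrec, hdrop, seg_mem rest a h, ← hj]
      simp
    · simp [h, seg_not_mem _ _ h]

theorem foldl_eq_seg (lst : List String) (a : Bool) (acc : List Bool) :
    (lst.foldl (fun (st : Bool × List Bool) x =>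
        let st := if x ≠ "flick" then (st.1, st.2 ++ [st.1]) else st
        if x = "flick" then (!st.1, st.2 ++ [!st.1]) else st) (a, acc)).2 =
    acc ++ seg lst a := by
  induction lst generalizing a acc with
  | nil => simp [seg]
  | cons x xs ih =>
    simp only [List.foldl]
    by_cases hx : x = "flick"
    · subst hx
      simp only [ne_eq, not_true_eq_false, if_false, reduceIte]
      rw [ih]
      simp [seg]
    · simp only [ne_eq, hx, not_false_eq_true, if_true]
      rw [ih]
      simp [seg, hx]

-- ===== VERDICT (by name: the statement is the Claim_ definition above) =====
theorem flick_switch_spec : Claim_equal_flick_switch := by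
  intro lst _
  unfold Spec_flick_switch flick_switch flick_switch_alt
  rw [foldl_eq_seg, flickGo_eq lst.length lst true 0 [] (by omega)]
  simp
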